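-- pv_equiv track=rewrite | github.com/abneeshsingh21/smartii-assistant- | backend/screen_awareness.py | _detect_errors
-- ===== SOURCE A (Python) =====
-- from typing import Dict, List, Optional
--
-- def _detect_errors(text: str) -> List[str]:
--     """Detect potential errors in text"""
--     errors = []
--     error_keywords = [
--         'error', 'exception', 'failed', 'warning',
--         'traceback', 'syntax error', 'undefined',
--         'null pointer', 'segmentation fault'
--     ]
--
--     text_lower = text.lower()
--     for keyword in error_keywords:
--         if keyword in text_lower:
--             # Find lines containing errors
--             lines = text.split('\n')
--             for line in lines:
--                 if keyword in line.lower():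
--                     errors.append(line.strip())
--
--     return errors if errors else ["No errors detected"]
-- ===== SOURCE B (Python) =====
-- from typing import Dict, List, Optional
--
-- def _detect_errors(text: str) -> List[str]:
--     """Detect potential errors in text (single indexing pass + ordered assembly)."""
--     error_keywords = [
--         'error', 'exception', 'failed', 'warning',
--         'traceback', 'syntax error', 'undefined',
--         'null pointer', 'segmentation fault'
--     ]
--     buckets: Dict[str, List[str]] = {}
--     for line in text.split('\n'):
--         low = line.lower()
--         for keyword in error_keywords:
--             if keyword in low:
--                 buckets.setdefault(keyword, []).append(line.strip())
--     result: List[str] = []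
--     for keyword in error_keywords:
--         result.extend(buckets.get(keyword, []))
--     return result if result else ["No errors detected"]
-- ===== Notes on version B (the rewrite author's own statement) =====
-- stated objective: alternative
-- what changed: Replaces A's per-keyword rescan of the line list (with a redundant whole-text guard) by a single pass over the lines that indexes stripped matching lines into a keyword->lines dict, followed by an ordered assembly pass over the fixed keyword list.
import Mathlib
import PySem

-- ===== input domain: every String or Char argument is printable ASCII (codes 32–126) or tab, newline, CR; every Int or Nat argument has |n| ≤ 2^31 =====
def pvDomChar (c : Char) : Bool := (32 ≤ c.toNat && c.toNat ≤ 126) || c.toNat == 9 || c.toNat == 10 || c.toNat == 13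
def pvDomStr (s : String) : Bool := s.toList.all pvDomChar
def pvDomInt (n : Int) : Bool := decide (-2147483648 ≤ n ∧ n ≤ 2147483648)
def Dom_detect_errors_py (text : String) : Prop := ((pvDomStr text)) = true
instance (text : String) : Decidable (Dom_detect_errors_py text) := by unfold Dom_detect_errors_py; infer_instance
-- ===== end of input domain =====

-- B replaces A's per-keyword rescan of the lines with ONE indexing pass over the lines
-- (keyword -> stripped matching lines dict) plus an ordered assembly pass (objective: alternative).

-- the fixed keyword list, shared verbatim by both Pythons
def pvKeywords : List String :=
  ["error", "exception", "failed", "warning",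
   "traceback", "syntax error", "undefined",
   "null pointer", "segmentation fault"]

-- ===== PORT A =====
-- text.split('\n') has a nonempty separator, so PySem.Str.split? always returns some; .getD [] only unwraps it
def detect_errors_py (text : String) : List String :=
  let text_lower := PySem.Str.lower text
  let errors : List String :=
    pvKeywords.foldl (fun errors keyword =>
      if PySem.Str.isIn keyword text_lower then
        ((PySem.Str.split? text "\n").getD []).foldl
          (fun errors line =>
            if PySem.Str.isIn keyword (PySem.Str.lower line) then
              errors ++ [PySem.Str.strip line]
            else errors)
          errors
      else errors) []
  if errors = [] then ["No errors detected"] else errors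

-- ===== PORT B =====
-- buckets.setdefault(kw, []).append(line.strip()) is ported as insert kw (getD kw [] ++ [strip line]):
-- Dict.insert overwrites in place / appends a new key, exactly Python's dict position rules
def detect_errors_py_alt (text : String) : List String :=
  let buckets : PySem.Dict String (List String) :=
    ((PySem.Str.split? text "\n").getD []).foldl
      (fun d line =>
        let low := PySem.Str.lower line
        pvKeywords.foldl (fun d keyword =>
          if PySem.Str.isIn keyword low then
            d.insert keyword (d.getD keyword [] ++ [PySem.Str.strip line])
          else d) d)
      PySem.Dict.empty
  let result : List String :=
    pvKeywords.foldl (fun res keyword => res ++ buckets.getD keyword []) []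
  if result = [] then ["No errors detected"] else result

-- ===== PRECONDITION & SPEC =====
def Spec_detect_errors_py (text : String) (out : List String) : Prop := out = detect_errors_py_alt text
instance (text : String) (out : List String) : Decidable (Spec_detect_errors_py text out) := by unfold Spec_detect_errors_py; infer_instance

-- ===== CLAIM (what is proved, stated in full; the proofs are below) =====
def Claim_equal_detect_errors_py : Prop := ∀ (text : String), Dom_detect_errors_py text → Spec_detect_errors_py text (detect_errors_py text)

-- ===== LEMMAS AND PROOFS =====

def pvLines (text : String) : List String := (PySem.Str.split? text "\n").getD []

def pvBucket (text kw : String) : List String :=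
  ((pvLines text).filter (fun line => PySem.Str.isIn kw (PySem.Str.lower line))).map PySem.Str.strip

-- every chunk produced by splitOn.go is an infix of s, given the loop invariants
theorem pv_go_infix (sep : List Char) (fuel : ℕ) :
    ∀ (l cur : List Char) (acc : List (List Char)) (s : List Char),
      cur.reverse ++ l <:+: s → (∀ a ∈ acc, a <:+: s) →
      ∀ x ∈ PySem.Chars.splitOn.go sep fuel l cur acc, x <:+: s := by
  induction fuel with
  | zero =>
    intro l cur acc s hcl hacc x hx
    rw [PySem.Chars.splitOn.go.eq_def] at hx
    simp only [List.mem_reverse, List.mem_cons] at hx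
    rcases hx with h | h
    · exact h ▸ hcl
    · exact hacc _ h
  | succ fuel ih =>
    intro l cur acc s hcl hacc x hx
    cases l with
    | nil =>
      rw [PySem.Chars.splitOn.go.eq_def] at hx
      simp only [List.mem_reverse, List.mem_cons] at hx
      rcases hx with h | h
      · subst h; simpa using hcl
      · exact hacc _ h
    | cons c rest =>
      rw [PySem.Chars.splitOn.go.eq_def] at hx
      simp only at hx
      by_cases hp : sep.isPrefixOf (c :: rest) = true
      · rw [if_pos hp] at hx
        have h1 : (c :: rest) <:+: s :=
          (List.suffix_append cur.reverse (c :: rest)).isInfix.trans hcl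
        refine ih _ [] _ s ?_ ?_ x hx
        · simpa using (List.drop_suffix sep.length (c :: rest)).isInfix.trans h1
        · intro a ha
          rcases List.mem_cons.mp ha with h | h
          · subst h
            exact (List.prefix_append cur.reverse (c :: rest)).isInfix.trans hcl
          · exact hacc _ h
      · rw [if_neg hp] at hx
        refine ih rest (c :: cur) acc s ?_ hacc x hx
        simpa using hcl

theorem pv_mem_splitOn_infix (s sep x : List Char) (hx : x ∈ PySem.Chars.splitOn s sep) : x <:+: s := by
  unfold PySem.Chars.splitOn at hx
  exact pv_go_infix sep _ s [] [] s (by simp) (by simp) x hx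

theorem pv_mem_lines_infix (text line : String) (h : line ∈ pvLines text) :
    line.toList <:+: text.toList := by
  unfold pvLines at h
  have hsep : ("\n" : String).toList = ['\n'] := by decide
  simp only [PySem.Str.split?, hsep, PySem.Chars.split?, List.isEmpty_cons,
    Bool.false_eq_true, if_false, Option.map_some, Option.getD_some, List.mem_map] at h
  obtain ⟨cs, hcs, rfl⟩ := h
  rw [String.toList_ofList]
  exact pv_mem_splitOn_infix _ _ _ hcs

-- if a keyword is absent from text.lower(), it is absent from every line.lower()
theorem pv_guard (text kw : String) (hg : PySem.Str.isIn kw (PySem.Str.lower text) = false) :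
    ∀ line ∈ pvLines text, PySem.Str.isIn kw (PySem.Str.lower line) = false := by
  intro line hline
  by_contra h
  rw [Bool.not_eq_false, PySem.Str.isIn_iff_infix] at h
  rw [Bool.eq_false_iff] at hg
  apply hg
  rw [PySem.Str.isIn_iff_infix]
  rw [PySem.Str.toList_lower, PySem.Chars.lower] at h ⊢
  exact List.IsInfix.trans h (List.IsInfix.map _ (pv_mem_lines_infix text line hline))

theorem pv_keywords_nodup : pvKeywords.Nodup := by decide

-- A's per-keyword step appends exactly the keyword's bucket
theorem pv_A_eq_fold (text : String) :
    detect_errors_py text =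
      (if (pvKeywords.foldl (fun a k => a ++ pvBucket text k) []) = [] then ["No errors detected"]
       else pvKeywords.foldl (fun a k => a ++ pvBucket text k) []) := by
  unfold detect_errors_py
  dsimp only
  have h : ∀ (acc : List String), ∀ k ∈ pvKeywords,
      (if PySem.Str.isIn k (PySem.Str.lower text) then
        ((PySem.Str.split? text "\n").getD []).foldl
          (fun errors line =>
            if PySem.Str.isIn k (PySem.Str.lower line) then errors ++ [PySem.Str.strip line]
            else errors) acc
      else acc) = acc ++ pvBucket text k := by
    intro acc k _
    by_cases hg : PySem.Str.isIn k (PySem.Str.lower text) = true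
    · rw [if_pos hg]
      exact PySem.List.foldl_append_if _ _ _ _
    · rw [if_neg hg]
      rw [Bool.not_eq_true] at hg
      have : pvBucket text k = [] := by
        unfold pvBucket
        rw [List.filter_eq_nil_iff.mpr ?_]
        · simp
        · intro line hline
          simpa using pv_guard text k hg line hline
      rw [this, List.append_nil]
  rw [PySem.List.foldl_congr_mem _ _ _ _ h]

-- B's inner keyword pass, characterised key by key
theorem pv_inner_getD (line : String) (ks : List String) (hnd : ks.Nodup) :
    ∀ (d : PySem.Dict String (List String)) (k : String),
      (ks.foldl (fun d kw =>
          if PySem.Str.isIn kw (PySem.Str.lower line) then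
            d.insert kw (d.getD kw [] ++ [PySem.Str.strip line])
          else d) d).getD k []
      = if k ∈ ks ∧ PySem.Str.isIn k (PySem.Str.lower line) = true then
          d.getD k [] ++ [PySem.Str.strip line]
        else d.getD k [] := by
  induction ks with
  | nil => intro d k; simp
  | cons a t ih =>
    intro d k
    rw [List.nodup_cons] at hnd
    rw [List.foldl_cons, ih hnd.2]
    by_cases ha : PySem.Str.isIn a (PySem.Str.lower line) = true
    · rw [if_pos ha]
      by_cases hka : k = a
      · subst hka
        have ha' : PySem.Chars.isIn k.toList (PySem.Chars.lower line.toList) = true := by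
          simpa using ha
        simp [hnd.1, ha']
      · simp only [PySem.Dict.getD_insert, if_neg hka]
        simp [List.mem_cons, hka]
    · rw [if_neg ha]
      by_cases hka : k = a
      · subst hka
        have ha' : PySem.Chars.isIn k.toList (PySem.Chars.lower line.toList) = false := by
          simpa using ha
        simp [hnd.1, ha']
      · simp [List.mem_cons, hka]

-- B's line pass accumulates, per keyword, exactly A's inner line fold
theorem pv_outer_getD (k : String) (hk : k ∈ pvKeywords) (lines : List String) :
    ∀ (d : PySem.Dict String (List String)),
      (lines.foldl (fun d line =>
          pvKeywords.foldl (fun d kw =>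
            if PySem.Str.isIn kw (PySem.Str.lower line) then
              d.insert kw (d.getD kw [] ++ [PySem.Str.strip line])
            else d) d) d).getD k []
      = lines.foldl (fun a line =>
          if PySem.Str.isIn k (PySem.Str.lower line) then a ++ [PySem.Str.strip line] else a)
          (d.getD k []) := by
  induction lines with
  | nil => intro d; simp
  | cons line t ih =>
    intro d
    rw [List.foldl_cons, ih, List.foldl_cons]
    congr 1
    rw [pv_inner_getD line pvKeywords pv_keywords_nodup d k]
    by_cases hc : PySem.Str.isIn k (PySem.Str.lower line) = true
    · rw [if_pos (⟨hk, hc⟩ : _ ∧ _), if_pos hc]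
    · rw [if_neg (fun h => hc h.2), if_neg hc]

theorem pv_B_eq_fold (text : String) :
    detect_errors_py_alt text =
      (if (pvKeywords.foldl (fun a k => a ++ pvBucket text k) []) = [] then ["No errors detected"]
       else pvKeywords.foldl (fun a k => a ++ pvBucket text k) []) := by
  unfold detect_errors_py_alt
  dsimp only
  have h : ∀ (acc : List String), ∀ k ∈ pvKeywords,
      acc ++ (((PySem.Str.split? text "\n").getD []).foldl
        (fun d line =>
          pvKeywords.foldl (fun d kw =>
            if PySem.Str.isIn kw (PySem.Str.lower line) then
              d.insert kw (d.getD kw [] ++ [PySem.Str.strip line])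
            else d) d)
        PySem.Dict.empty).getD k []
      = acc ++ pvBucket text k := by
    intro acc k hk
    congr 1
    rw [pv_outer_getD k hk _ PySem.Dict.empty]
    have hemp : (PySem.Dict.empty : PySem.Dict String (List String)).getD k [] = [] := by
      simp [PySem.Dict.getD, PySem.Dict.get?, PySem.Dict.empty]
    rw [hemp, PySem.List.foldl_append_if
      (fun line => PySem.Str.isIn k (PySem.Str.lower line)) PySem.Str.strip _ []]
    unfold pvBucket pvLines
    simp
  rw [PySem.List.foldl_congr_mem _ _ _ _ h]

-- ===== VERDICT (by name: the statement is the Claim_ definition above) =====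
theorem detect_errors_py_spec : Claim_equal_detect_errors_py := by
  intro text _
  unfold Spec_detect_errors_py
  rw [pv_A_eq_fold, pv_B_eq_fold]
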